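-- pv_equiv track=rewrite | github.com/vbrichant/DEV2-2021-2022 | tp2.py | grade_position
-- ===== SOURCE A (Python) =====
-- def grade_position(all_grades, student_id):
--     position = 1
--     cotes_en_simple = []
--     for y in all_grades:
--         if all_grades[y] not in cotes_en_simple:
--             cotes_en_simple.append(all_grades[y])
--     cotes_en_simple.sort(reverse=True)
--     for i in all_grades:
--         if student_id == i:
--             for u in cotes_en_simple:
--                 if u == all_grades[i]:
--                     return position
--                 if u > all_grades[i]:
--                     position += 1
--     return 0
-- ===== SOURCE B (Python) =====
-- def grade_position(all_grades, student_id):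
--     if student_id not in all_grades:
--         return 0
--     sg = all_grades[student_id]
--     return len({g for g in all_grades.values() if g > sg}) + 1
-- ===== Notes on version B (the rewrite author's own statement) =====
-- stated objective: simpler
-- what changed: B replaces A's build-distinct-list / sort-descending / nested position-scan with a membership guard and a single filtering count of the distinct grades strictly above the student's.
import Mathlib
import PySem

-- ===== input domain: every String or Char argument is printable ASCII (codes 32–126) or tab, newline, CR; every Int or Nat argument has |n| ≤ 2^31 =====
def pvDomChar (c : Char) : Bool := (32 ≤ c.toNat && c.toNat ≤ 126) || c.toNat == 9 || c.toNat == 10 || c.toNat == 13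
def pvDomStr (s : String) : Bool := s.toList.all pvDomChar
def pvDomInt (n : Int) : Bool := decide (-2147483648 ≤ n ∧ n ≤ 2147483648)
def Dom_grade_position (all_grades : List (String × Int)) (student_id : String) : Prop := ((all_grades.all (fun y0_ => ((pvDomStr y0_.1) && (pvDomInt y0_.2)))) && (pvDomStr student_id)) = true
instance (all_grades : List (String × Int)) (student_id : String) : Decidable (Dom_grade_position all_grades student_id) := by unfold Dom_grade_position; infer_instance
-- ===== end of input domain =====

-- B replaces A's distinct-list build + descending sort + nested position scan by a
-- membership guard and a single filtering count of distinct greater grades (simpler).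


-- ===== PORT A =====
-- inner loop 'for u in cotes_en_simple: if u == g: return position; if u > g: position += 1'
-- (first component: 'some r' = early return; second: the position left behind if it falls through)
def gpScan (cotes : List Int) (g : Int) (pos : Int) : Option Int × Int :=
  match cotes with
  | [] => (none, pos)
  | u :: rest =>
    if u == g then (some pos, pos)
    else if g < u then gpScan rest g (pos + 1)
    else gpScan rest g pos
-- outer loop 'for i in all_grades: if student_id == i: …' (position persists across iterations);
-- iterating the dict's items, 'all_grades[i]' for the item (i, v) is v (dict keys are unique)
def gpOuter (items : List (String × Int)) (sid : String) (cotes : List Int) (pos : Int) : Int :=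
  match items with
  | [] => 0
  | (i, v) :: rest =>
    if sid == i then
      match gpScan cotes v pos with
      | (some r, _) => r
      | (none, pos') => gpOuter rest sid cotes pos'
    else gpOuter rest sid cotes pos

def grade_position (all_grades : List (String × Int)) (student_id : String) : Int :=
  -- first loop: build cotes_en_simple ('all_grades[y]' for the item (y, v) is v)
  let cotes := all_grades.foldl (fun acc (p : String × Int) => if p.2 ∈ acc then acc else acc ++ [p.2]) []
  -- cotes_en_simple.sort(reverse=True)
  let sortedCotes := PySem.List.sorted cotes (fun x => x) true
  gpOuter all_grades student_id sortedCotes 1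

-- ===== PORT B =====
def grade_position_alt (all_grades : List (String × Int)) (student_id : String) : Int :=
  match all_grades.lookup student_id with
  | none => 0
  | some sg =>
    ((PySem.Set.ofList ((all_grades.map Prod.snd).filter (fun g => sg < g))).length : Int) + 1

-- ===== PRECONDITION & SPEC =====
def Spec_grade_position (all_grades : List (String × Int)) (student_id : String) (out : Int) : Prop := out = grade_position_alt all_grades student_id
instance (all_grades : List (String × Int)) (student_id : String) (out : Int) : Decidable (Spec_grade_position all_grades student_id out) := by unfold Spec_grade_position; infer_instance

-- ===== CLAIM (what is proved, stated in full; the proofs are below) =====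
def Claim_equal_grade_position : Prop := ∀ (all_grades : List (String × Int)) (student_id : String), Dom_grade_position all_grades student_id → Spec_grade_position all_grades student_id (grade_position all_grades student_id)

-- ===== LEMMAS AND PROOFS =====

-- the inner scan over a strictly decreasing list containing g returns, and its value is
-- the starting position plus the number of elements strictly above g
lemma gpScan_eq (cotes : List Int) (g pos : Int) (hg : g ∈ cotes)
    (hd : cotes.Pairwise (fun a b => b < a)) :
    gpScan cotes g pos =
      (some (pos + ((cotes.filter (fun u => decide (g < u))).length : Int)),
       pos + ((cotes.filter (fun u => decide (g < u))).length : Int)) := by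
  induction cotes generalizing pos with
  | nil => cases hg
  | cons u rest ih =>
    rcases List.pairwise_cons.mp hd with ⟨hu, hrest⟩
    by_cases h : u = g
    · subst h
      have hemp : rest.filter (fun u' => decide (u < u')) = [] := by
        apply List.filter_eq_nil_iff.mpr
        intro x hx
        simp only [decide_eq_true_eq, not_lt] at *
        exact le_of_lt (hu x hx)
      simp [gpScan, hemp]
    · have hg' : g ∈ rest := by
        rcases hg with _ | h' ; · exact absurd rfl h
        · assumption
      by_cases hlt : g < u
      · have hrec := ih (pos + 1) hg' hrest
        simp only [gpScan, beq_iff_eq, h, if_false, hlt, if_pos, hrec]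
        rw [List.filter_cons_of_pos (by simp [hlt])]
        push_cast [List.length_cons]
        ring_nf
      · exact absurd (hu g hg') (by omega)

-- the outer loop, over any strictly decreasing cotes covering all grade values
lemma gpOuter_eq (l : List (String × Int)) (sid : String) (cotes : List Int) (pos : Int)
    (hmem : ∀ p ∈ l, p.2 ∈ cotes) (hd : cotes.Pairwise (fun a b => b < a)) :
    gpOuter l sid cotes pos =
      match l.lookup sid with
      | none => 0
      | some v => pos + ((cotes.filter (fun u => decide (v < u))).length : Int) := by
  induction l generalizing pos with
  | nil => rfl
  | cons p rest ih =>
    obtain ⟨i, v⟩ := p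
    by_cases h : sid = i
    · subst h
      have hv : v ∈ cotes := hmem (sid, v) (by simp)
      simp [gpOuter, List.lookup, gpScan_eq cotes v pos hv hd]
    · have hb : (sid == i) = false := by simp [h]
      simp only [gpOuter, List.lookup, hb]
      exact ih pos (fun p hp => hmem p (List.mem_cons_of_mem _ hp))

-- A's first loop builds set(values) as an ordered dedup
lemma cotes_eq_ofList (l : List (String × Int)) :
    l.foldl (fun acc (p : String × Int) => if p.2 ∈ acc then acc else acc ++ [p.2]) []
      = PySem.Set.ofList (l.map Prod.snd) := by
  have hf : (fun acc (p : String × Int) => if p.2 ∈ acc then acc else acc ++ [p.2])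
      = fun acc (p : String × Int) => PySem.Set.add acc p.2 := by
    funext acc p
    simp [PySem.Set.add, PySem.Set.contains]
  rw [hf, PySem.Set.ofList_eq_foldl, List.foldl_map]

-- two nodup lists with the same membership have the same length
lemma length_eq_of_nodup_mem {xs ys : List Int} (hx : xs.Nodup) (hy : ys.Nodup)
    (h : ∀ a, a ∈ xs ↔ a ∈ ys) : xs.length = ys.length := by
  rw [← List.toFinset_card_of_nodup hx, ← List.toFinset_card_of_nodup hy]
  congr 1
  ext a
  simp [h a]

theorem grade_position_spec : Claim_equal_grade_position := by
  intro l sid _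
  unfold Spec_grade_position grade_position grade_position_alt
  set vs := l.map Prod.snd with hvs
  rw [cotes_eq_ofList]
  set D := PySem.Set.ofList vs with hD
  set S := PySem.List.sorted D (fun x => x) true with hS
  have hperm : S.Perm D := PySem.List.sorted_perm D (fun x => x) true
  have hnodupS : S.Nodup := hperm.nodup_iff.mpr (PySem.Set.nodup_ofList vs)
  have hle : S.Pairwise (fun a b => b ≤ a) := by
    have := PySem.List.sorted_pairwise_rev D (fun x => x)
    simpa [← hS] using this
  have hd : S.Pairwise (fun a b => b < a) :=
    (hle.and hnodupS).imp (fun h => lt_of_le_of_ne h.1 (Ne.symm h.2))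
  have hmemS : ∀ a : Int, a ∈ S ↔ a ∈ vs := by
    intro a
    rw [hperm.mem_iff, hD, PySem.Set.mem_ofList]
  rw [gpOuter_eq l sid S 1
        (fun p hp => (hmemS p.2).mpr (by exact List.mem_map_of_mem hp)) hd]
  cases hlk : l.lookup sid with
  | none => rfl
  | some v =>
    have hcount : (S.filter (fun u => decide (v < u))).length
        = (PySem.Set.ofList (vs.filter (fun g => decide (v < g)))).length := by
      apply length_eq_of_nodup_mem (hnodupS.filter _)
        (PySem.Set.nodup_ofList _)
      intro a
      simp [List.mem_filter, PySem.Set.mem_ofList, hmemS a]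
    simp only [hcount]
    ring_nf

-- ===== VERDICT (by name: the statement is the Claim_ definition above) =====
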